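-- pv_equiv track=rewrite | github.com/E2zzreal/TwinScientist | preprocess/transcript_clean.py | get_speaker_stats
-- ===== SOURCE A (Python) =====
-- def get_speaker_stats(segments: list[dict]) -> dict:
--     """Compute speaking time/turns per speaker."""
--     stats: dict[str, dict] = {}
--     for seg in segments:
--         sp = seg["speaker"]
--         if sp not in stats:
--             stats[sp] = {"turns": 0, "chars": 0}
--         stats[sp]["turns"] += 1
--         stats[sp]["chars"] += len(seg["text"])
--
--     # Sort by turns
--     return dict(sorted(stats.items(), key=lambda x: -x[1]["turns"]))
-- ===== SOURCE B (Python) =====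
-- def get_speaker_stats(segments: list[dict]) -> dict:
--     """Compute speaking time/turns per speaker (group-then-reduce)."""
--     groups: dict[str, list[str]] = {}
--     for seg in segments:
--         groups.setdefault(seg["speaker"], []).append(seg["text"])
--     stats = {sp: {"turns": len(ts), "chars": sum(len(t) for t in ts)}
--              for sp, ts in groups.items()}
--     return dict(sorted(stats.items(), key=lambda x: -x[1]["turns"]))
-- ===== Notes on version B (the rewrite author's own statement) =====
-- stated objective: alternative
-- what changed: B groups segment texts per speaker first (setdefault/append) and then reduces each group to turns/chars in a dict comprehension, instead of A's inline running counters updated per segment.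
import Mathlib
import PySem

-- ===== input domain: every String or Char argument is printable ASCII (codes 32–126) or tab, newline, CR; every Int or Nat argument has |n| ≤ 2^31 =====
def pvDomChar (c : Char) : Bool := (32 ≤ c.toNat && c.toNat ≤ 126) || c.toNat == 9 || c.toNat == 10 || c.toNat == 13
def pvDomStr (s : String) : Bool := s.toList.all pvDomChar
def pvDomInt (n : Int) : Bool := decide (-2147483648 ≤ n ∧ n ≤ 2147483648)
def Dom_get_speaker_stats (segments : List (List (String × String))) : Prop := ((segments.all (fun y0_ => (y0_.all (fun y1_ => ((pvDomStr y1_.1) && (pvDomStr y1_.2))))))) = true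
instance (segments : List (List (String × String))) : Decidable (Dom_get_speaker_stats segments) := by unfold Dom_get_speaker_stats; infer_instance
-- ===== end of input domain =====

-- B groups the texts per speaker first and reduces each group afterwards, instead of A's inline running counters; same cost, different decomposition.

-- ===== PORT A =====
-- seg["speaker"] / seg["text"] (Pre_ guarantees the keys are present, so getD never takes its default)
def pvSpeaker (seg : List (String × String)) : String := (PySem.Dict.mk seg).getD "speaker" ""
def pvText (seg : List (String × String)) : String := (PySem.Dict.mk seg).getD "text" ""

-- one iteration of A's loop body
def pvStepA (st : PySem.Dict String (PySem.Dict String Int)) (seg : List (String × String)) :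
    PySem.Dict String (PySem.Dict String Int) :=
  let sp := pvSpeaker seg
  let st := if st.contains sp then st else st.insert sp (PySem.Dict.ofList [("turns", (0 : Int)), ("chars", (0 : Int))])
  let inner := st.getD sp PySem.Dict.empty
  let inner := inner.insert "turns" (inner.getD "turns" 0 + 1)
  let inner := inner.insert "chars" (inner.getD "chars" 0 + PySem.Str.len (pvText seg))
  st.insert sp inner

def get_speaker_stats (segments : List (List (String × String))) : List (String × List (String × Int)) :=
  let stats := segments.foldl pvStepA PySem.Dict.empty
  (PySem.List.sorted stats.items (fun x => -(x.2.getD "turns" 0)) false).map (fun p => (p.1, p.2.items))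

-- ===== PORT B =====
-- {"turns": len(ts), "chars": sum(len(t) for t in ts)}
def pvReduce (ts : List String) : PySem.Dict String Int :=
  PySem.Dict.ofList [("turns", (ts.length : Int)), ("chars", (ts.map PySem.Str.len).sum)]

def get_speaker_stats_alt (segments : List (List (String × String))) : List (String × List (String × Int)) :=
  let groups := segments.foldl (fun g seg => g.modify (pvSpeaker seg) [] (· ++ [pvText seg])) PySem.Dict.empty
  let stats := groups.items.map (fun p => (p.1, pvReduce p.2))
  (PySem.List.sorted stats (fun x => -(x.2.getD "turns" 0)) false).map (fun p => (p.1, p.2.items))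

-- ===== PRECONDITION & SPEC =====
-- Pre_ excludes segments missing the "speaker" or "text" key, on which the Python A raises KeyError.
def Pre_get_speaker_stats (segments : List (List (String × String))) : Prop :=
  ∀ seg ∈ segments, (PySem.Dict.mk seg).contains "speaker" = true ∧ (PySem.Dict.mk seg).contains "text" = true
instance (segments : List (List (String × String))) : Decidable (Pre_get_speaker_stats segments) := by unfold Pre_get_speaker_stats; infer_instance
def pvWitness_get_speaker_stats : (List (List (String × String))) := [[("speaker", "A"), ("text", "hi")]]

def Spec_get_speaker_stats (segments : List (List (String × String))) (out : List (String × List (String × Int))) : Prop := out = get_speaker_stats_alt segments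
instance (segments : List (List (String × String))) (out : List (String × List (String × Int))) : Decidable (Spec_get_speaker_stats segments out) := by unfold Spec_get_speaker_stats; infer_instance

-- ===== CLAIM (what is proved, stated in full; the proofs are below) =====
def Claim_equal_get_speaker_stats : Prop := ∀ (segments : List (List (String × String))), Dom_get_speaker_stats segments → Pre_get_speaker_stats segments → Spec_get_speaker_stats segments (get_speaker_stats segments)

-- ===== LEMMAS AND PROOFS =====

def pvFmt (p : String × List String) : String × PySem.Dict String Int := (p.1, pvReduce p.2)

def pvStepB (g : PySem.Dict String (List String)) (seg : List (String × String)) :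
    PySem.Dict String (List String) :=
  g.modify (pvSpeaker seg) [] (· ++ [pvText seg])

-- the two-key literal dict algebra A's loop body performs (all definitional)
lemma pvDict2_upd (a b x y : Int) :
    ((PySem.Dict.ofList [("turns", a), ("chars", b)]).insert "turns" x).insert "chars" y
      = PySem.Dict.ofList [("turns", x), ("chars", y)] := rfl

lemma pvReduce_snoc (ts : List String) (txt : String) :
    ((pvReduce ts).insert "turns" ((pvReduce ts).getD "turns" 0 + 1)).insert "chars"
        (((pvReduce ts).insert "turns" ((pvReduce ts).getD "turns" 0 + 1)).getD "chars" 0 + PySem.Str.len txt)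
      = pvReduce (ts ++ [txt]) := by
  show ((PySem.Dict.ofList [("turns", (ts.length : Int)), ("chars", (ts.map PySem.Str.len).sum)]).insert "turns"
          ((ts.length : Int) + 1)).insert "chars" ((ts.map PySem.Str.len).sum + PySem.Str.len txt)
      = _
  rw [pvDict2_upd]
  unfold pvReduce
  congr 2
  · simp
  · simp

lemma pvKeys_eq (st : PySem.Dict String (PySem.Dict String Int)) (g : PySem.Dict String (List String))
    (h : st.items = g.items.map pvFmt) : st.keys = g.keys := by
  show st.items.map Prod.fst = g.items.map Prod.fst
  rw [h, List.map_map]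
  exact List.map_congr_left (fun p _ => rfl)

lemma pvRel_step (st : PySem.Dict String (PySem.Dict String Int)) (g : PySem.Dict String (List String))
    (hnd : g.keys.Nodup) (h : st.items = g.items.map pvFmt) (seg : List (String × String)) :
    (pvStepA st seg).items = (pvStepB g seg).items.map pvFmt := by
  have hkeys := pvKeys_eq st g h
  have hndst : st.keys.Nodup := hkeys ▸ hnd
  have hcont : st.contains (pvSpeaker seg) = g.contains (pvSpeaker seg) := by
    rw [PySem.Dict.contains_eq_decide_mem_keys, PySem.Dict.contains_eq_decide_mem_keys, hkeys]
  have hmodify : pvStepB g seg = g.insert (pvSpeaker seg) (g.getD (pvSpeaker seg) [] ++ [pvText seg]) := rfl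
  by_cases hc : g.contains (pvSpeaker seg) = true
  · -- the speaker has been seen: both sides replace its entry in place
    obtain ⟨ts, hget⟩ : ∃ ts, g.get? (pvSpeaker seg) = some ts := by
      rw [PySem.Dict.contains_eq_isSome_get?] at hc
      exact Option.isSome_iff_exists.mp hc
    have hgd : g.getD (pvSpeaker seg) [] = ts := PySem.Dict.getD_of_get?_eq_some _ _ hget
    have hmem : ((pvSpeaker seg), ts) ∈ g.items := PySem.Dict.mem_items_of_get?_eq_some _ hget
    have hmemst : ((pvSpeaker seg), pvReduce ts) ∈ st.items := by
      rw [h]; exact List.mem_map_of_mem hmem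
    have hgdst : st.getD (pvSpeaker seg) PySem.Dict.empty = pvReduce ts :=
      PySem.Dict.getD_of_mem_items _ hmemst hndst PySem.Dict.empty
    have hcst : st.contains (pvSpeaker seg) = true := hcont.trans hc
    unfold pvStepA
    dsimp only
    rw [hmodify]
    simp only [hcst, if_true, hgdst]
    rw [PySem.Dict.items_insert_of_contains _ _ hcst,
        PySem.Dict.items_insert_of_contains _ _ hc,
        pvReduce_snoc, h, List.map_map, List.map_map]
    refine List.map_congr_left (fun q _ => ?_)
    by_cases hq : q.1 == pvSpeaker seg
    · simp only [Function.comp, pvFmt, hq, if_true, hgd]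
    · simp only [Function.comp, pvFmt, hq]
      simp only [Bool.false_eq_true, if_false]
  · -- a new speaker: both sides append a fresh entry
    have hc' : g.contains (pvSpeaker seg) = false := by simpa using hc
    have hcst : st.contains (pvSpeaker seg) = false := by rw [hcont, hc']
    have hnotmem : pvSpeaker seg ∉ g.keys := by
      rw [PySem.Dict.contains_eq_decide_mem_keys] at hc'
      simpa using hc'
    unfold pvStepA
    dsimp only
    rw [hmodify, PySem.Dict.getD_of_not_contains _ _ hc']
    simp only [hcst, Bool.false_eq_true, if_false]
    rw [PySem.Dict.getD_insert_self,
        PySem.Dict.items_insert_of_contains _ _ (PySem.Dict.contains_insert_self _ _ _),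
        PySem.Dict.items_insert_of_not_contains _ _ hcst,
        PySem.Dict.items_insert_of_not_contains _ _ hc',
        List.map_append, List.map_append]
    rw [List.map_congr_left (l := st.items)
          (f := fun p => if p.1 == pvSpeaker seg then (pvSpeaker seg, _) else p) (g := id) ?_]
    · rw [List.map_id]
      congr 1
      simp only [List.map_cons, List.map_nil, beq_self_eq_true, if_true, pvFmt]
      congr 2
      show ((PySem.Dict.ofList [("turns", (0:Int)), ("chars", (0:Int))]).insert "turns" ((0:Int) + 1)).insert "chars"
            ((0:Int) + PySem.Str.len (pvText seg)) = pvReduce [pvText seg]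
      rw [pvDict2_upd]
      unfold pvReduce
      norm_num
    · intro q hq
      have : q.1 ≠ pvSpeaker seg := by
        intro he
        exact hnotmem (hkeys ▸ (he ▸ PySem.Dict.mem_keys_of_mem_items _ hq))
      simp [this]

lemma pvRel_fold (l : List (List (String × String)))
    (st : PySem.Dict String (PySem.Dict String Int)) (g : PySem.Dict String (List String))
    (hnd : g.keys.Nodup) (h : st.items = g.items.map pvFmt) :
    (l.foldl pvStepA st).items = (l.foldl pvStepB g).items.map pvFmt := by
  induction l generalizing st g with
  | nil => exact h
  | cons seg rest ih =>
      simp only [List.foldl_cons]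
      exact ih _ _ (PySem.Dict.nodup_keys_foldl_modify_key [seg] pvSpeaker [] (fun _ _ => (· ++ [pvText seg])) g hnd) (pvRel_step st g hnd h seg)

-- ===== VERDICT (by name: the statement is the Claim_ definition above) =====
theorem get_speaker_stats_spec : Claim_equal_get_speaker_stats := by
  intro segments _ _
  unfold Spec_get_speaker_stats get_speaker_stats get_speaker_stats_alt
  have h := pvRel_fold segments PySem.Dict.empty PySem.Dict.empty (by simp) rfl
  rw [show pvFmt = (fun p => (p.1, pvReduce p.2)) from rfl] at h
  show List.map _ (PySem.List.sorted (List.foldl pvStepA PySem.Dict.empty segments).items _ false) =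
       List.map _ (PySem.List.sorted ((List.foldl pvStepB PySem.Dict.empty segments).items.map (fun p => (p.1, pvReduce p.2))) _ false)
  rw [h]
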